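-- pv_equiv track=rewrite | github.com/zenathark/jg.waveletcodec | waveletcodec/wave.py | get_z_order
-- ===== SOURCE A (Python) =====
-- import math
--
-- def get_z_order(dim):
--     mtx = []
--     n = int(math.log(dim, 2))
--     pows = range(int(n / 2))
--     for i in range(dim):
--         x = 0
--         y = 0
--         for j in pows:
--             x |= ((i >> 2 * j) & 1) << j
--             y |= ((i >> 2 * j + 1) & 1) << j
--         mtx += [(y, x)]
--     return mtx
-- ===== SOURCE B (Python) =====
-- import math
--
-- def get_z_order(dim):
--     n = int(math.log(dim, 2))
--     half = int(n / 2)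
--     period = [(0, 0)]
--     for _ in range(half):
--         period = [p for (y, x) in period
--                   for p in ((2 * y, 2 * x), (2 * y, 2 * x + 1),
--                             (2 * y + 1, 2 * x), (2 * y + 1, 2 * x + 1))]
--     reps = -(-dim // len(period))
--     return (period * reps)[:dim]
-- ===== Notes on version B (the rewrite author's own statement) =====
-- stated objective: faster
-- what changed: Replaces the per-index bit-deinterleaving inner loop by recursive quadrant doubling: the length-4^half period of the Z-curve is built once by repeated flatMap expansion and the result is produced by tiling it and slicing to dim.
import Mathlib
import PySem

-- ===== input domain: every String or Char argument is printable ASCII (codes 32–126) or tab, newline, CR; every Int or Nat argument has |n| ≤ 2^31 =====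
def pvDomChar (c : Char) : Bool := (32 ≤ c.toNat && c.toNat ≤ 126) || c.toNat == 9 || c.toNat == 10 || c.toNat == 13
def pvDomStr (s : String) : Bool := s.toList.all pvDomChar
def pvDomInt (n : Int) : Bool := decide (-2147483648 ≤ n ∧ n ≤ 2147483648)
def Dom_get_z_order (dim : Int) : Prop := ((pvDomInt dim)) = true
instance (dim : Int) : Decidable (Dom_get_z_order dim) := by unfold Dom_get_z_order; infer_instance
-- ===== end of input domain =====

-- B replaces A's per-index bit-deinterleaving loop by building the Z-curve period once via
-- quadrant doubling and tiling it (measurably faster in Python).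

-- ===== PORT A =====
-- n = int(math.log(dim, 2)): ported as bit_length(dim) - 1, which equals floor(log2 dim)
-- exactly for every 1 ≤ dim ≤ 2^31 (verified against CPython over the whole domain).
-- int(n / 2) = n // 2 since n ≥ 0 there. Shift amounts 2*j, 2*j+1, j are ≥ 0 (j from range),
-- so .toNat on them is exact.
def get_z_order (dim : Int) : List (Int × Int) :=
  let n : Int := (PySem.Int.bitLength dim : Int) - 1
  let pows : List Int := PySem.List.pyRange 0 (PySem.Int.floordiv n 2) 1
  (PySem.List.pyRange 0 dim 1).foldl
    (fun mtx i =>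
      let p : Int × Int := pows.foldl
        (fun p j =>
          (PySem.Int.bor p.1 ((PySem.Int.band (i >>> (2 * j + 1).toNat) 1) <<< j.toNat),
           PySem.Int.bor p.2 ((PySem.Int.band (i >>> (2 * j).toNat) 1) <<< j.toNat)))
        (0, 0)
      mtx ++ [(p.1, p.2)]) []

-- ===== PORT B =====
-- Same n as port A (see the comment there); half ≥ 0 and reps ≥ 1 on 1 ≤ dim, so .toNat is exact.
-- 'period * reps' is List.flatten (List.replicate …); '[:dim]' is PySem.List.slice.
def get_z_order_alt (dim : Int) : List (Int × Int) :=
  let n : Int := (PySem.Int.bitLength dim : Int) - 1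
  let half : Int := PySem.Int.floordiv n 2
  let period : List (Int × Int) :=
    (PySem.List.pyRange 0 half 1).foldl
      (fun per _ =>
        per.flatMap (fun p =>
          [(2 * p.1, 2 * p.2), (2 * p.1, 2 * p.2 + 1),
           (2 * p.1 + 1, 2 * p.2), (2 * p.1 + 1, 2 * p.2 + 1)]))
      [(0, 0)]
  let reps : Int := -(PySem.Int.floordiv (-dim) (PySem.List.len period))
  PySem.List.slice (List.flatten (List.replicate reps.toNat period)) none (some dim)

-- ===== PRECONDITION & SPEC =====
-- math.log raises ValueError for dim ≤ 0, so A returns exactly on 1 ≤ dim.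
def Pre_get_z_order (dim : Int) : Prop := 1 ≤ dim
instance (dim : Int) : Decidable (Pre_get_z_order dim) := by unfold Pre_get_z_order; infer_instance
def pvWitness_get_z_order : Int := (6)

def Spec_get_z_order (dim : Int) (out : List (Int × Int)) : Prop := out = get_z_order_alt dim
instance (dim : Int) (out : List (Int × Int)) : Decidable (Spec_get_z_order dim out) := by unfold Spec_get_z_order; infer_instance

-- ===== CLAIM (what is proved, stated in full; the proofs are below) =====
def Claim_equal_get_z_order : Prop := ∀ (dim : Int), Dom_get_z_order dim → Pre_get_z_order dim → Spec_get_z_order dim (get_z_order dim)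

-- ===== LEMMAS AND PROOFS =====

-- the bit-pair deinterleaving of i over h bit pairs: zX = even bits, zY = odd bits
def zX (h i : Nat) : Nat := ∑ j ∈ Finset.range h, i / 4 ^ j % 2 * 2 ^ j
def zY (h i : Nat) : Nat := ∑ j ∈ Finset.range h, i / (2 * 4 ^ j) % 2 * 2 ^ j

theorem zX_lt (h i : Nat) : zX h i < 2 ^ h := by
  induction h with
  | zero => simp [zX]
  | succ h ih =>
    have h1 : i / 4 ^ h % 2 ≤ 1 := by omega
    have h2 : (2:Nat) ^ (h+1) = 2 ^ h + 2 ^ h := by ring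
    have h3 : i / 4 ^ h % 2 * 2 ^ h ≤ 1 * 2 ^ h := mul_le_mul_left h1 _
    simp only [zX, Finset.sum_range_succ] at *
    omega

theorem zY_lt (h i : Nat) : zY h i < 2 ^ h := by
  induction h with
  | zero => simp [zY]
  | succ h ih =>
    have h1 : i / (2 * 4 ^ h) % 2 ≤ 1 := by omega
    have h2 : (2:Nat) ^ (h+1) = 2 ^ h + 2 ^ h := by ring
    have h3 : i / (2 * 4 ^ h) % 2 * 2 ^ h ≤ 1 * 2 ^ h := mul_le_mul_left h1 _
    simp only [zY, Finset.sum_range_succ] at *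
    omega

theorem zX_succ (h i : Nat) : zX (h+1) i = i % 2 + 2 * zX h (i / 4) := by
  have hstep : ∀ j, j ∈ Finset.range h → i / 4 ^ (j+1) % 2 * 2 ^ (j+1) = 2 * (i / 4 / 4 ^ j % 2 * 2 ^ j) := by
    intro j _
    have hd : i / 4 ^ (j+1) = i / 4 / 4 ^ j := by
      rw [Nat.div_div_eq_div_mul]; ring_nf
    rw [hd]; ring
  simp only [zX, Finset.sum_range_succ']
  rw [Finset.sum_congr rfl hstep, ← Finset.mul_sum]
  simp [Nat.add_comm]

theorem zY_succ (h i : Nat) : zY (h+1) i = i / 2 % 2 + 2 * zY h (i / 4) := by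
  have hstep : ∀ j, j ∈ Finset.range h → i / (2 * 4 ^ (j+1)) % 2 * 2 ^ (j+1) = 2 * (i / 4 / (2 * 4 ^ j) % 2 * 2 ^ j) := by
    intro j _
    have hd : i / (2 * 4 ^ (j+1)) = i / 4 / (2 * 4 ^ j) := by
      rw [Nat.div_div_eq_div_mul]; ring_nf
    rw [hd]; ring
  simp only [zY, Finset.sum_range_succ']
  rw [Finset.sum_congr rfl hstep, ← Finset.mul_sum]
  simp [Nat.add_comm]

theorem zX_mod (h i : Nat) : zX h (i % 4 ^ h) = zX h i := by
  induction h generalizing i with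
  | zero => simp [zX]
  | succ h ih =>
    have e1 : i % 4 ^ (h+1) % 2 = i % 2 :=
      Nat.mod_mod_of_dvd i (by exact Dvd.intro (2 * 4 ^ h) (by ring))
    have e2 : i % 4 ^ (h+1) / 4 = i / 4 % 4 ^ h := by
      have : (4:Nat) ^ (h+1) = 4 * 4 ^ h := by ring
      rw [this, Nat.mod_mul_right_div_self]
    rw [zX_succ, zX_succ, e1, e2, ih]

theorem zY_mod (h i : Nat) : zY h (i % 4 ^ h) = zY h i := by
  induction h generalizing i with
  | zero => simp [zY]
  | succ h ih =>
    have e1 : i % 4 ^ (h+1) % 2 = i % 2 :=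
      Nat.mod_mod_of_dvd i (by exact Dvd.intro (2 * 4 ^ h) (by ring))
    have e1' : i % 4 ^ (h+1) / 2 % 2 = i / 2 % 2 := by
      have h4 : (4:Nat) ^ (h+1) = 2 * (2 * 4 ^ h) := by ring
      rw [h4, Nat.mod_mul_right_div_self, Nat.mod_mod_of_dvd _ (Dvd.intro (4 ^ h) rfl)]
    have e2 : i % 4 ^ (h+1) / 4 = i / 4 % 4 ^ h := by
      have : (4:Nat) ^ (h+1) = 4 * 4 ^ h := by ring
      rw [this, Nat.mod_mul_right_div_self]
    rw [zY_succ, zY_succ, e1', e2, ih]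

theorem lor_two_pow_of_lt : ∀ (h a : Nat), a < 2^h → a ||| 2^h = a + 2^h := by
  intro h
  induction h with
  | zero => intro a ha; interval_cases a; decide
  | succ h ih =>
    intro a ha
    have hd : a / 2 < 2 ^ h := by
      rw [Nat.div_lt_iff_lt_mul (by norm_num)]
      calc a < 2^(h+1) := ha
        _ = 2^h*2 := by ring
    have key := ih (a / 2) hd
    have hb : Nat.bit (a.testBit 0) (a >>> 1) = a := Nat.bit_testBit_zero_shiftRight_one a
    have h2 : (2:Nat)^(h+1) = Nat.bit false (2^h) := by simp [Nat.bit]; ring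
    rw [← hb, h2, Nat.lor_bit]
    have hs : a >>> 1 = a / 2 := Nat.shiftRight_one a
    rw [hs, key]
    rcases Nat.testBit a 0 <;> simp [Nat.bit] <;> omega

-- port A's inner loop over pows = range(h) deinterleaves the bits of k
theorem innerA_eq (h k : Nat) :
    (PySem.List.pyRange 0 (h : Int) 1).foldl
      (fun (p : Int × Int) j =>
        (PySem.Int.bor p.1 ((PySem.Int.band ((k : Int) >>> (2 * j + 1).toNat) 1) <<< j.toNat),
         PySem.Int.bor p.2 ((PySem.Int.band ((k : Int) >>> (2 * j).toNat) 1) <<< j.toNat)))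
      (0, 0) = ((zY h k : Int), (zX h k : Int)) := by
  induction h with
  | zero => simp [PySem.List.pyRange_one_eq_nil, zX, zY]
  | succ h ih =>
    have hsp : PySem.List.pyRange 0 ((h:Int)+1) 1 = PySem.List.pyRange 0 (h:Int) 1 ++ [(h:Int)] := by
      simpa using PySem.List.pyRange_one_succ_right (a := 0) (b := (h:Int)) (by positivity)
    rw [show (((h+1 : Nat)) : Int) = ((h:Int)+1) from by push_cast; ring, hsp, List.foldl_append, ih]
    simp only [List.foldl_cons, List.foldl_nil]
    have ht1 : (2 * (h:Int) + 1).toNat = 2*h+1 := by omega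
    have ht0 : (2 * (h:Int)).toNat = 2*h := by omega
    have hth : ((h:Int)).toNat = h := by omega
    rw [ht1, ht0, hth, Int.shiftRight_natCast, Int.shiftRight_natCast]
    have hb1 : PySem.Int.band ((k >>> (2*h+1) : Nat) : Int) 1 = (((k >>> (2*h+1)) &&& 1 : Nat) : Int) := by
      have := PySem.Int.band_natCast (k >>> (2*h+1)) 1
      simpa using this
    have hb0 : PySem.Int.band ((k >>> (2*h) : Nat) : Int) 1 = (((k >>> (2*h)) &&& 1 : Nat) : Int) := by
      have := PySem.Int.band_natCast (k >>> (2*h)) 1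
      simpa using this
    rw [hb1, hb0, Int.shiftLeft_natCast, Int.shiftLeft_natCast,
        PySem.Int.bor_natCast, PySem.Int.bor_natCast]
    have hY : zY h k ||| ((k >>> (2*h+1)) &&& 1) <<< h = zY (h+1) k := by
      rw [Nat.and_one_is_mod, Nat.shiftRight_eq_div_pow, Nat.shiftLeft_eq]
      have hp : (2:Nat) ^ (2*h+1) = 2 * 4 ^ h := by
        rw [pow_succ, pow_mul]; norm_num; ring
      rw [hp]
      have hc : k / (2 * 4 ^ h) % 2 = 0 ∨ k / (2 * 4 ^ h) % 2 = 1 := by omega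
      have hsum : zY (h+1) k = zY h k + k / (2 * 4 ^ h) % 2 * 2 ^ h := by
        simp [zY, Finset.sum_range_succ]
      rcases hc with hc | hc
      · simp [hc, hsum]
      · simp [hc, hsum, lor_two_pow_of_lt h _ (zY_lt h k)]
    have hX : zX h k ||| ((k >>> (2*h)) &&& 1) <<< h = zX (h+1) k := by
      rw [Nat.and_one_is_mod, Nat.shiftRight_eq_div_pow, Nat.shiftLeft_eq]
      have hp : (2:Nat) ^ (2*h) = 4 ^ h := by
        rw [pow_mul]; norm_num
      rw [hp]
      have hc : k / 4 ^ h % 2 = 0 ∨ k / 4 ^ h % 2 = 1 := by omega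
      have hsum : zX (h+1) k = zX h k + k / 4 ^ h % 2 * 2 ^ h := by
        simp [zX, Finset.sum_range_succ]
      rcases hc with hc | hc
      · simp [hc, hsum]
      · simp [hc, hsum, lor_two_pow_of_lt h _ (zX_lt h k)]
    rw [← hY, ← hX]

theorem flatMap_four {α : Type} (m : Nat) (f : Nat → α) :
    (List.range m).flatMap (fun q => [f (4*q), f (4*q+1), f (4*q+2), f (4*q+3)])
      = (List.range (4*m)).map f := by
  induction m with
  | zero => simp
  | succ m ih =>
    rw [List.range_succ, List.flatMap_append, ih]
    rw [show 4 * (m+1) = ((((4*m)+1)+1)+1)+1 from by ring,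
        List.range_succ, List.range_succ, List.range_succ, List.range_succ]
    simp

-- port B's doubling loop builds exactly the bit-deinterleaving table of period 4^h
theorem period_eq (h : Nat) :
    (PySem.List.pyRange 0 (h : Int) 1).foldl
      (fun per _ => per.flatMap (fun p : Int × Int =>
        [(2 * p.1, 2 * p.2), (2 * p.1, 2 * p.2 + 1),
         (2 * p.1 + 1, 2 * p.2), (2 * p.1 + 1, 2 * p.2 + 1)]))
      [(0, 0)]
      = (List.range (4 ^ h)).map (fun i => ((zY h i : Int), (zX h i : Int))) := by
  induction h with
  | zero => simp [PySem.List.pyRange_one_eq_nil, zX, zY]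
  | succ h ih =>
    have hsp : PySem.List.pyRange 0 ((h:Int)+1) 1 = PySem.List.pyRange 0 (h:Int) 1 ++ [(h:Int)] := by
      simpa using PySem.List.pyRange_one_succ_right (a := 0) (b := (h:Int)) (by positivity)
    rw [show (((h+1 : Nat)) : Int) = ((h:Int)+1) from by push_cast; ring,
        hsp, List.foldl_append, ih]
    simp only [List.foldl_cons, List.foldl_nil]
    rw [List.flatMap_map]
    have hstep := flatMap_four (4 ^ h) (fun i => ((zY (h+1) i : Int), (zX (h+1) i : Int)))
    rw [show 4 * 4 ^ h = 4 ^ (h+1) from by ring] at hstep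
    rw [← hstep]
    refine congrArg (fun f => List.flatMap f (List.range (4 ^ h))) (funext fun q => ?_)
    have d0 : (4*q)/4 = q := by omega
    have d1 : (4*q+1)/4 = q := by omega
    have d2 : (4*q+2)/4 = q := by omega
    have d3 : (4*q+3)/4 = q := by omega
    have e0 : (4*q)/2 % 2 = 0 := by omega
    have e1 : (4*q+1)/2 % 2 = 0 := by omega
    have e2 : (4*q+2)/2 % 2 = 1 := by omega
    have e3 : (4*q+3)/2 % 2 = 1 := by omega
    have m0 : (4*q) % 2 = 0 := by omega
    have m1 : (4*q+1) % 2 = 1 := by omega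
    have m2 : (4*q+2) % 2 = 0 := by omega
    have m3 : (4*q+3) % 2 = 1 := by omega
    simp only [zX_succ, zY_succ, d0, d1, d2, d3, e0, e1, e2, e3,
               m0, m1, m2, m3, List.cons.injEq, Prod.mk.injEq, and_true]
    push_cast
    omega

theorem flatten_replicate_getElem? {α : Type} (p : List α) :
    ∀ (r k : Nat), k < r * p.length →
      (List.flatten (List.replicate r p))[k]? = p[k % p.length]? := by
  intro r
  induction r with
  | zero => intro k hk; omega
  | succ r ih =>
    intro k hk
    rw [List.replicate_succ, List.flatten_cons]
    by_cases hkp : k < p.length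
    · rw [List.getElem?_append_left hkp, Nat.mod_eq_of_lt hkp]
    · have hle : p.length ≤ k := by omega
      rw [List.getElem?_append_right hle]
      have hmul : (r+1) * p.length = r * p.length + p.length := by ring
      rw [ih (k - p.length) (by omega), ← Nat.mod_eq_sub_mod hle]

theorem bitLength_pos (dim : Int) (hdim : 1 ≤ dim) : 1 ≤ PySem.Int.bitLength dim := by
  by_contra hb
  have h0 : PySem.Int.bitLength dim = 0 := by omega
  have hlt := PySem.Int.lt_two_pow_bitLength dim
  rw [h0] at hlt
  simp at hlt
  omega

theorem main_eq (dim : Int) (hdim : 1 ≤ dim) : get_z_order dim = get_z_order_alt dim := by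
  have hbl := bitLength_pos dim hdim
  have hhalf : PySem.Int.floordiv ((PySem.Int.bitLength dim : Int) - 1) 2
      = (((PySem.Int.bitLength dim - 1) / 2 : Nat) : Int) := by
    rw [show ((PySem.Int.bitLength dim : Int) - 1) = ((PySem.Int.bitLength dim - 1 : Nat) : Int) from by omega]
    exact_mod_cast PySem.Int.floordiv_natCast (PySem.Int.bitLength dim - 1) 2
  set H : Nat := (PySem.Int.bitLength dim - 1) / 2 with hH
  set f : Nat → Int × Int := fun k => ((zY H k : Int), (zX H k : Int)) with hf
  -- A-side characterization
  have hA : get_z_order dim = (List.range dim.toNat).map f := by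
    simp only [get_z_order]
    rw [hhalf, PySem.List.foldl_append_singleton_eq_map, List.nil_append,
        PySem.List.pyRange_one 0 dim, List.map_map,
        show (dim - 0) = dim from by ring]
    apply List.map_congr_left
    intro k _
    simp only [Function.comp, zero_add]
    rw [innerA_eq H k]
  -- B-side characterization
  have hB : get_z_order_alt dim
      = List.take dim.toNat (List.flatten (List.replicate
          (-(PySem.Int.floordiv (-dim) ((4:Int) ^ H))).toNat ((List.range (4 ^ H)).map f))) := by
    simp only [get_z_order_alt]
    rw [hhalf, period_eq H]
    rw [show PySem.List.len ((List.range (4 ^ H)).map f) = ((4:Int) ^ H) from by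
      simp [PySem.List.len_eq]]
    have hgoal := PySem.List.slice_to (xs := List.flatten (List.replicate
          (-(PySem.Int.floordiv (-dim) ((4:Int) ^ H))).toNat ((List.range (4 ^ H)).map f)))
          (b := dim) (by omega)
    exact hgoal
  -- bounds for the repetition count
  set L : Nat := 4 ^ H with hLdef
  have hLpos : 0 < L := pow_pos (by norm_num) H
  have hLcast : ((4:Int) ^ H) = ((L : Nat) : Int) := by exact_mod_cast rfl
  set R : Int := -(PySem.Int.floordiv (-dim) ((4:Int) ^ H)) with hRdef
  have hmod0 : 0 ≤ PySem.Int.mod (-dim) ((4:Int) ^ H) := by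
    rw [hLcast]; exact PySem.Int.mod_nonneg _ (by exact_mod_cast hLpos)
  have hmodlt : PySem.Int.mod (-dim) ((4:Int) ^ H) < ((4:Int) ^ H) := by
    rw [hLcast]; exact PySem.Int.mod_lt _ (by exact_mod_cast hLpos)
  have hdivmod := PySem.Int.floordiv_mul_add_mod (-dim) ((4:Int) ^ H)
  have hRL : dim ≤ R * ((4:Int) ^ H) := by
    have : R * ((4:Int) ^ H) = dim + PySem.Int.mod (-dim) ((4:Int) ^ H) := by
      rw [hRdef]; nlinarith [hdivmod]
    omega
  have hRpos : 0 < R := by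
    by_contra hRn
    have hR0 : R ≤ 0 := by omega
    have : R * ((4:Int) ^ H) ≤ 0 :=
      mul_nonpos_of_nonpos_of_nonneg hR0 (by positivity)
    omega
  have hdimle : dim.toNat ≤ R.toNat * L := by
    have hc : ((R.toNat * L : Nat) : Int) = R * ((4:Int) ^ H) := by
      push_cast [Int.toNat_of_nonneg hRpos.le, hLcast]
      ring
    omega
  -- element-by-element comparison
  rw [hA, hB]
  apply List.ext_getElem?
  intro k
  by_cases hk : k < dim.toNat
  · rw [List.getElem?_take_of_lt hk,
        flatten_replicate_getElem? _ R.toNat k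
          (by simpa using lt_of_lt_of_le hk hdimle),
        show ((List.range L).map f).length = L from by simp]
    have hmodL : k % L < L := Nat.mod_lt _ hLpos
    rw [List.getElem?_map, List.getElem?_map,
        List.getElem?_range hk, List.getElem?_range hmodL]
    simp only [Option.map_some]
    have : f (k % L) = f k := by
      simp only [hf, hLdef]
      rw [zX_mod H k, zY_mod H k]
    rw [this]
  · have h1 : (List.map f (List.range dim.toNat)).length ≤ k := by simp; omega
    have h2 : (List.take dim.toNat
        (List.flatten (List.replicate R.toNat ((List.range L).map f)))).length ≤ k := by
      simp [List.length_take]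
      omega
    rw [List.getElem?_eq_none_iff.mpr h1, List.getElem?_eq_none_iff.mpr h2]

-- ===== VERDICT (by name: the statement is the Claim_ definition above) =====
theorem get_z_order_spec : Claim_equal_get_z_order := by
  intro dim _ hpre
  unfold Spec_get_z_order
  exact main_eq dim hpre
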